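-- pv_equiv track=rewrite | github.com/pythonxiaochon/ele_price_predict | analysis/time_period_labeling.py | _minute_to_label
-- ===== SOURCE A (Python) =====
-- _MARCH_VALLEY_RANGES = [
--     (60, 300),     # 01:00–05:00
--     (690, 720),    # 11:30–12:00
--     (840, 870),    # 14:00–14:30
-- ]
--
-- _MARCH_PEAK_RANGES = [
--     (960, 1320),   # 16:00–22:00
-- ]
--
-- def _minute_to_label(minute_of_day: int) -> str:
--     """Return the period label for a given minute-of-day (0–1439)."""
--     for start, end in _MARCH_VALLEY_RANGES:
--         if start <= minute_of_day < end:
--             return "低谷"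
--     for start, end in _MARCH_PEAK_RANGES:
--         if start <= minute_of_day < end:
--             return "高峰"
--     return "平段"
-- ===== SOURCE B (Python) =====
-- _MARCH_VALLEY_RANGES = [
--     (60, 300),
--     (690, 720),
--     (840, 870),
-- ]
--
-- _MARCH_PEAK_RANGES = [
--     (960, 1320),
-- ]
--
-- # Precomputed direct-index table for all 1440 minutes; peaks written first,
-- # valleys second so valleys win (they are disjoint anyway, matching A's precedence).
-- _LABEL_TABLE = ["平段"] * 1440
-- for _s, _e in _MARCH_PEAK_RANGES:
--     _LABEL_TABLE[_s:_e] = ["高峰"] * (_e - _s)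
-- for _s, _e in _MARCH_VALLEY_RANGES:
--     _LABEL_TABLE[_s:_e] = ["低谷"] * (_e - _s)
--
--
-- def _minute_to_label(minute_of_day: int) -> str:
--     """Return the period label for a given minute-of-day (0–1439)."""
--     if 0 <= minute_of_day < 1440:
--         return _LABEL_TABLE[minute_of_day]
--     return "平段"
-- ===== Notes on version B (the rewrite author's own statement) =====
-- stated objective: alternative
-- what changed: Replaces A's per-call scans over the valley and peak range lists by a minute-indexed label table built once at module load (peaks filled, then valleys) and a single guarded direct index, returning the flat label for minutes outside the day exactly as A does.
import Mathlib
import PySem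

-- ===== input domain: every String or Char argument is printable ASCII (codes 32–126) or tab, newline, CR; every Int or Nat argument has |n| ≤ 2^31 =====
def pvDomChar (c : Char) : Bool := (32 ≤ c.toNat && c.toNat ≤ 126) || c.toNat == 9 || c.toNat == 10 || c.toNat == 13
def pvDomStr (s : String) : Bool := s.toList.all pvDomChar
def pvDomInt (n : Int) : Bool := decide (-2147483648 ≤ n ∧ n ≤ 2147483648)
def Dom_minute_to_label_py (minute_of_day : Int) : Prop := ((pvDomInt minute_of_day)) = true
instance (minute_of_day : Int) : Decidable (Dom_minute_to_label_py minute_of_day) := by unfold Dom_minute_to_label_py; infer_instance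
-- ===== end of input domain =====

-- B replaces A's per-call scans over the range lists by a table of 1440 labels built once
-- at module load and a single guarded index; objective: alternative (direct-index lookup).

-- ===== PORT A =====
def pvMarchValleyRanges : List (Int × Int) := [(60, 300), (690, 720), (840, 870)]

def pvMarchPeakRanges : List (Int × Int) := [(960, 1320)]

-- 'for start, end in ranges: if start <= m < end: return lab' as an early-return scan
def pvScan (rs : List (Int × Int)) (m : Int) (lab : String) : Option String :=
  match rs with
  | [] => none
  | (s, e) :: rest => if s ≤ m ∧ m < e then some lab else pvScan rest m lab

def minute_to_label_py (minute_of_day : Int) : String :=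
  match pvScan pvMarchValleyRanges minute_of_day "低谷" with
  | some l => l
  | none =>
    match pvScan pvMarchPeakRanges minute_of_day "高峰" with
    | some l => l
    | none => "平段"

-- ===== PORT B =====
-- the slice assignment t[s:e] = [lab]*(e-s)  (0 ≤ s ≤ e within the table)
def pvSliceAssign (t : List String) (s e : Nat) (lab : String) : List String :=
  t.take s ++ List.replicate (e - s) lab ++ t.drop e

-- the module-level table: all '平段', then peaks, then valleys (valleys win)
def pvLabelTable : List String :=
  let t0 := List.replicate 1440 "平段"
  let t1 := [((960 : Nat), (1320 : Nat))].foldl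
    (fun acc (p : Nat × Nat) => pvSliceAssign acc p.1 p.2 "高峰") t0
  [((60 : Nat), (300 : Nat)), (690, 720), (840, 870)].foldl
    (fun acc (p : Nat × Nat) => pvSliceAssign acc p.1 p.2 "低谷") t1

def minute_to_label_py_alt (minute_of_day : Int) : String :=
  if 0 ≤ minute_of_day ∧ minute_of_day < 1440 then
    (PySem.List.pyGet? pvLabelTable minute_of_day).getD "平段"  -- index provably in range
  else "平段"

-- ===== PRECONDITION & SPEC =====
def Spec_minute_to_label_py (minute_of_day : Int) (out : String) : Prop := out = minute_to_label_py_alt minute_of_day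
instance (minute_of_day : Int) (out : String) : Decidable (Spec_minute_to_label_py minute_of_day out) := by unfold Spec_minute_to_label_py; infer_instance

-- ===== CLAIM (what is proved, stated in full; the proofs are below) =====
def Claim_equal_minute_to_label_py : Prop := ∀ (minute_of_day : Int), Dom_minute_to_label_py minute_of_day → Spec_minute_to_label_py minute_of_day (minute_to_label_py minute_of_day)

-- ===== LEMMAS AND PROOFS =====
-- the table, written as its nine constant segments
def pvSeg : List String :=
  List.replicate 60 "平段" ++ List.replicate 240 "低谷" ++ List.replicate 390 "平段" ++
  List.replicate 30 "低谷" ++ List.replicate 120 "平段" ++ List.replicate 30 "低谷" ++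
  List.replicate 90 "平段" ++ List.replicate 360 "高峰" ++ List.replicate 120 "平段"

set_option maxRecDepth 20000 in
theorem pv_tab_eq : pvLabelTable = pvSeg := by decide

theorem pv_a_eq (m : Int) : minute_to_label_py m =
    if 60 ≤ m ∧ m < 300 then "低谷"
    else if 690 ≤ m ∧ m < 720 then "低谷"
    else if 840 ≤ m ∧ m < 870 then "低谷"
    else if 960 ≤ m ∧ m < 1320 then "高峰"
    else "平段" := by
  unfold minute_to_label_py pvScan pvMarchValleyRanges pvMarchPeakRanges
  split_ifs <;> simp [pvScan, *]

theorem pv_alt_char (n : Nat) (h : n < 1440) : minute_to_label_py_alt (n : Int) =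
    if 60 ≤ (n : Int) ∧ (n : Int) < 300 then "低谷"
    else if 690 ≤ (n : Int) ∧ (n : Int) < 720 then "低谷"
    else if 840 ≤ (n : Int) ∧ (n : Int) < 870 then "低谷"
    else if 960 ≤ (n : Int) ∧ (n : Int) < 1320 then "高峰"
    else "平段" := by
  unfold minute_to_label_py_alt
  rw [if_pos (by constructor <;> omega), pv_tab_eq]
  simp only [PySem.List.pyGet?_natCast, pvSeg, List.getElem?_append,
    List.length_append, List.length_replicate, List.getElem?_replicate]
  split_ifs <;> first | rfl | omega

theorem pv_A_out_of_range (m : Int) (h : m < 0 ∨ 1440 ≤ m) :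
    minute_to_label_py m = "平段" := by
  rw [pv_a_eq]
  split_ifs <;> first | rfl | omega

-- ===== VERDICT (by name: the statement is the Claim_ definition above) =====
theorem minute_to_label_py_spec : Claim_equal_minute_to_label_py := by
  intro m _
  unfold Spec_minute_to_label_py
  by_cases h : 0 <= m ∧ m < 1440
  · obtain ⟨h0, h1⟩ := h
    lift m to Nat using h0 with n
    rw [pv_a_eq, pv_alt_char n (by exact_mod_cast h1)]
  · rw [pv_A_out_of_range m (by omega)]
    unfold minute_to_label_py_alt
    rw [if_neg h]
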